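-- pv_equiv track=rewrite | github.com/Evilmaax/URI_respostas_solutions | testes.py | boundedRatio
-- ===== SOURCE A (Python) =====
-- def boundedRatio(a, l, r):
--     bol = []
--
--     for x in range(len(a)):
--         flag = 0
--         for y in range(l, r + 1):
--             if (x+1)*y == a[x] and flag == 0:
--                 bol.append(True)
--                 flag = 1
--                 break
--
--         if flag == 0:
--          bol.append(False)
--
--     return bol
-- ===== SOURCE B (Python) =====
-- def boundedRatio(a, l, r):
--     return [v % (x + 1) == 0 and l <= v // (x + 1) <= r for x, v in enumerate(a)]
-- ===== Notes on version B (the rewrite author's own statement) =====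
-- stated objective: faster
-- what changed: Replaced A's inner scan over every y in range(l, r+1) (with a flag and break) by a single divisibility-and-quotient-bounds test per element: a[x] % (x+1) == 0 and l <= a[x] // (x+1) <= r.
import Mathlib
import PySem

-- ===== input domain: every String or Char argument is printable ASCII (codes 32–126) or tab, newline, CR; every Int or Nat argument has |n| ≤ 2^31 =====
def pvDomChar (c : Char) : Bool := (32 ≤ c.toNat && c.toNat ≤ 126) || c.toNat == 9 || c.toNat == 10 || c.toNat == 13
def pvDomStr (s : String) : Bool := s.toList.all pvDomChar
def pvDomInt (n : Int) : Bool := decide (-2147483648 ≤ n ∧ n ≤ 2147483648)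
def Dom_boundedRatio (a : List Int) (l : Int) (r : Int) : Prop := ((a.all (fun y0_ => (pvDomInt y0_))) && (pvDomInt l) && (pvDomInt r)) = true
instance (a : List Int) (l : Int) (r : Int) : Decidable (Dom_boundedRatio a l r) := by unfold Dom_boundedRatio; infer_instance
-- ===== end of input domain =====

-- B replaces A's inner scan over range(l, r+1) by a single divisibility test per index; O(n) vs O(n*(r-l)).

-- ===== PORT A =====
-- inner 'for y in range(l, r+1): if (x+1)*y == a[x]: …; break' — returns whether the break fired (flag)
def pvInnerA (k v : Int) : List Int → Bool
  | [] => false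
  | y :: ys => if k * y == v then true else pvInnerA k v ys

def boundedRatio (a : List Int) (l : Int) (r : Int) : List Bool :=
  (List.range a.length).foldl
    (fun (bol : List Bool) (x : Nat) =>
      bol ++ [pvInnerA ((x : Int) + 1) (PySem.List.pyGetD a (x : Int) 0) (PySem.List.pyRange l (r + 1))])
    []

-- ===== PORT B =====
def boundedRatio_alt (a : List Int) (l : Int) (r : Int) : List Bool :=
  (PySem.List.enumerate a).map
    (fun p =>
      (PySem.Int.mod p.2 (p.1 + 1) == 0) &&
      (decide (l ≤ PySem.Int.floordiv p.2 (p.1 + 1)) && decide (PySem.Int.floordiv p.2 (p.1 + 1) ≤ r)))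

-- ===== PRECONDITION & SPEC =====
def Spec_boundedRatio (a : List Int) (l : Int) (r : Int) (out : List Bool) : Prop := out = boundedRatio_alt a l r
instance (a : List Int) (l : Int) (r : Int) (out : List Bool) : Decidable (Spec_boundedRatio a l r out) := by unfold Spec_boundedRatio; infer_instance

-- ===== CLAIM (what is proved, stated in full; the proofs are below) =====
def Claim_equal_boundedRatio : Prop := ∀ (a : List Int) (l : Int) (r : Int), Dom_boundedRatio a l r → Spec_boundedRatio a l r (boundedRatio a l r)

-- ===== LEMMAS AND PROOFS =====

theorem pvInnerA_eq_any (k v : Int) (ys : List Int) :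
    pvInnerA k v ys = ys.any (fun y => k * y == v) := by
  induction ys with
  | nil => rfl
  | cons y ys ih => by_cases h : k * y = v <;> simp [pvInnerA, h, ih]

theorem pvInner_eq_div (k v l r : Int) (hk : 0 < k) :
    pvInnerA k v (PySem.List.pyRange l (r + 1)) =
      ((PySem.Int.mod v k == 0) &&
        (decide (l ≤ PySem.Int.floordiv v k) && decide (PySem.Int.floordiv v k ≤ r))) := by
  rw [pvInnerA_eq_any, Bool.eq_iff_iff]
  simp only [List.any_eq_true, PySem.List.mem_pyRange_one, beq_iff_eq,
    PySem.Int.mod_eq_zero_iff_dvd, PySem.Int.floordiv_eq_ediv_of_pos hk,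
    Bool.and_eq_true, decide_eq_true_eq]
  constructor
  · rintro ⟨y, ⟨hl, hr⟩, hv⟩
    have hq : v / k = y := by rw [← hv, Int.mul_ediv_cancel_left y (ne_of_gt hk)]
    exact ⟨⟨y, hv.symm⟩, by omega, by omega⟩
  · rintro ⟨⟨c, rfl⟩, h1, h2⟩
    have hq : k * c / k = c := Int.mul_ediv_cancel_left c (ne_of_gt hk)
    rw [hq] at h1 h2
    exact ⟨c, ⟨h1, by omega⟩, rfl⟩

theorem pvEnumLen {α : Type} (a : List α) (s : Int) :
    (PySem.List.enumerate a s).length = a.length := by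
  induction a generalizing s with
  | nil => rfl
  | cons x t ih => simp [PySem.List.enumerate, ih]

theorem pvEnumGet {α : Type} (a : List α) (s : Int) (i : Nat) (h : i < a.length)
    (h' : i < (PySem.List.enumerate a s).length) :
    (PySem.List.enumerate a s)[i] = (s + i, a[i]) := by
  induction a generalizing s i with
  | nil => simp at h
  | cons x t ih =>
    cases i with
    | zero => simp [PySem.List.enumerate]
    | succ j =>
      have := ih (s + 1) j (by simpa using h) (by simpa [pvEnumLen] using h)
      simp [PySem.List.enumerate, this]
      omega

theorem boundedRatio_spec : Claim_equal_boundedRatio := by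
  intro a l r _
  show boundedRatio a l r = boundedRatio_alt a l r
  unfold boundedRatio boundedRatio_alt
  rw [PySem.List.foldl_append_singleton_eq_map]
  apply List.ext_getElem
  · simp
  · intro i h1 h2
    have hi : i < a.length := by simpa using h1
    simp only [List.getElem_map, List.getElem_range, List.nil_append]
    rw [pvEnumGet a 0 i hi (by rwa [pvEnumLen])]
    rw [PySem.List.pyGetD_eq_getElem a 0 (by positivity) (by exact_mod_cast hi)]
    simp only [Int.toNat_natCast, Int.zero_add]
    exact pvInner_eq_div ((i : Int) + 1) a[i] l r (by positivity)
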